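-- pv_equiv track=rewrite | github.com/yeojingi/genome-sequencing | week2/lesson4/lib/Degrees.py | degrees
-- ===== SOURCE A (Python) =====
-- def degrees(edges):
--   degs = {}
--   for key, value in edges.items():
--     if not degs.get(key):
--       degs[key] = len(value)
--     else:
--       degs[key] += len(value)
--
--     for v in value:
--       if not degs.get(v):
--         degs[v] = -1
--       else:
--         degs[v] -= 1
--
--   return degs
-- ===== SOURCE B (Python) =====
-- def degrees(edges):
--     # In-degree of a node = how often it occurs in any adjacency list.
--     flat = [v for value in edges.values() for v in value]
--     cnt = {}
--     for v in flat:
--         cnt[v] = cnt.get(v, 0) + 1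
--     # Nodes in first-seen order (key first, then its neighbors), deduplicated.
--     order = dict.fromkeys(x for key, value in edges.items() for x in [key] + value)
--     # Net degree by closed formula: out-degree (adjacency length) minus in-degree.
--     return {n: len(edges.get(n, ())) - cnt.get(n, 0) for n in order}
-- ===== Notes on version B (the rewrite author's own statement) =====
-- stated objective: alternative
-- what changed: A builds the answer by interleaved, truthiness-branched signed updates of one dict; B never accumulates the answer: it counts neighbor occurrences once, dedups the nodes in first-seen order with dict.fromkeys, and builds the result dict in one comprehension from the closed formula len(adjacency) - occurrence count.
import Mathlib
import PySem

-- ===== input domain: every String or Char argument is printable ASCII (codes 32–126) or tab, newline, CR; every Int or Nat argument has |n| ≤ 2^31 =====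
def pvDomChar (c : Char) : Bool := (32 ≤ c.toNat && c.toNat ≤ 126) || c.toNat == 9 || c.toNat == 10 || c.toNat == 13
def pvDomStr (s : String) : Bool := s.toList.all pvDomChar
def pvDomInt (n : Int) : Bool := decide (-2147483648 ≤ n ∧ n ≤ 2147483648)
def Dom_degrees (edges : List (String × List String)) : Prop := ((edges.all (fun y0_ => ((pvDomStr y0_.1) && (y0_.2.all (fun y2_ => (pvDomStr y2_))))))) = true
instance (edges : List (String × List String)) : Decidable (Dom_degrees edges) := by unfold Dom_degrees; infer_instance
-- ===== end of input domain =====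

-- B never accumulates the answer: it counts neighbor occurrences once, dedups the nodes
-- in first-seen order, and builds the result dict from the closed formula
-- len(adjacency) - occurrence count. Equivalent on dict inputs (distinct keys).

-- ===== PORT A =====
def degrees (edges : List (String × List String)) : List (String × Int) :=
  (edges.foldl (fun degs kv =>
      -- if not degs.get(key): degs[key] = len(value) else: degs[key] += len(value)
      let degs :=
        if (degs.get? kv.1).getD 0 = 0 then degs.insert kv.1 (kv.2.length : Int)
        else degs.insert kv.1 (degs.getD kv.1 0 + (kv.2.length : Int))
      -- for v in value: if not degs.get(v): degs[v] = -1 else: degs[v] -= 1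
      kv.2.foldl (fun degs v =>
        if (degs.get? v).getD 0 = 0 then degs.insert v (-1)
        else degs.insert v (degs.getD v 0 - 1)) degs)
    (PySem.Dict.empty : PySem.Dict String Int)).items

-- ===== PORT B =====
def degrees_alt (edges : List (String × List String)) : List (String × Int) :=
  -- flat = [v for value in edges.values() for v in value]
  let flat := edges.flatMap (fun kv => kv.2)
  -- cnt = {}; for v in flat: cnt[v] = cnt.get(v, 0) + 1
  let cnt := flat.foldl (fun d v => d.insert v (d.getD v 0 + 1))
    (PySem.Dict.empty : PySem.Dict String Int)
  -- order = dict.fromkeys(x for key, value in edges.items() for x in [key] + value)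
  let order := PySem.List.dedup (edges.flatMap (fun kv => kv.1 :: kv.2))
  -- {n: len(edges.get(n, ())) - cnt.get(n, 0) for n in order}
  order.map (fun n =>
    (n, (match edges.find? (fun kv => kv.1 == n) with
         | some kv => (kv.2.length : Int)
         | none => 0) - cnt.getD n 0))

-- ===== PRECONDITION & SPEC =====
-- Pre_ excludes association lists with duplicate keys: such a list cannot arise from a
-- Python dict argument (dict keys are unique), so this excludes no Python input of A.
def Pre_degrees (edges : List (String × List String)) : Prop :=
  (edges.map Prod.fst).Nodup
instance (edges : List (String × List String)) : Decidable (Pre_degrees edges) := by unfold Pre_degrees; infer_instance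
def pvWitness_degrees : (List (String × List String)) :=
  [("a", ["b", "a"]), ("c", [])]

def Spec_degrees (edges : List (String × List String)) (out : List (String × Int)) : Prop := out = degrees_alt edges
instance (edges : List (String × List String)) (out : List (String × Int)) : Decidable (Spec_degrees edges out) := by unfold Spec_degrees; infer_instance

-- ===== CLAIM (what is proved, stated in full; the proofs are below) =====
def Claim_equal_degrees : Prop := ∀ (edges : List (String × List String)), Dom_degrees edges → Pre_degrees edges → Spec_degrees edges (degrees edges)

-- ===== LEMMAS AND PROOFS =====

-- the signed (node, delta) event stream that A's interleaved loop processes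
def pvDeltas (edges : List (String × List String)) : List (String × Int) :=
  edges.flatMap (fun kv => (kv.1, (kv.2.length : Int)) :: kv.2.map (fun v => (v, (-1 : Int))))

-- one accumulation step on the event stream
def bStep (degs : PySem.Dict String Int) (nd : String × Int) : PySem.Dict String Int :=
  degs.insert nd.1 (degs.getD nd.1 0 + nd.2)

-- A's truthiness-guarded update of key k by delta equals the uniform step
theorem stepA_eq_bStep (degs : PySem.Dict String Int) (k : String) (δ : Int) :
    (if (degs.get? k).getD 0 = 0 then degs.insert k δ
     else degs.insert k (degs.getD k 0 + δ)) = bStep degs (k, δ) := by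
  unfold bStep
  rw [PySem.Dict.getD_eq_get?_getD]
  by_cases h : (degs.get? k).getD 0 = 0
  · simp [h]
  · simp [h]

-- the inner loop of A is the accumulation over the -1 events
theorem innerA_eq (vs : List String) (degs : PySem.Dict String Int) :
    vs.foldl (fun degs v =>
        if (degs.get? v).getD 0 = 0 then degs.insert v (-1)
        else degs.insert v (degs.getD v 0 - 1)) degs
      = (vs.map (fun v => (v, (-1 : Int)))).foldl bStep degs := by
  rw [List.foldl_map]
  apply PySem.List.foldl_congr_mem
  intro acc v _
  have := stepA_eq_bStep acc v (-1)
  simpa [sub_eq_add_neg] using this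

-- A's whole fold is the event-stream fold
theorem dictsA_eq (edges : List (String × List String))
    (degs : PySem.Dict String Int) :
    edges.foldl (fun degs kv =>
      let degs :=
        if (degs.get? kv.1).getD 0 = 0 then degs.insert kv.1 (kv.2.length : Int)
        else degs.insert kv.1 (degs.getD kv.1 0 + (kv.2.length : Int))
      kv.2.foldl (fun degs v =>
        if (degs.get? v).getD 0 = 0 then degs.insert v (-1)
        else degs.insert v (degs.getD v 0 - 1)) degs) degs
    = (pvDeltas edges).foldl bStep degs := by
  induction edges generalizing degs with
  | nil => rfl
  | cons kv rest ih =>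
      simp only [List.foldl_cons, pvDeltas, List.flatMap_cons, List.foldl_append]
      rw [ih]
      congr 1
      rw [innerA_eq, stepA_eq_bStep]

-- value of the event-stream fold at any key: sum of the matching deltas
theorem getD_foldl_bStep (l : List (String × Int)) (d : PySem.Dict String Int) (k : String) :
    (l.foldl bStep d).getD k 0
      = d.getD k 0 + ((l.filter (fun p => p.1 == k)).map Prod.snd).sum := by
  induction l generalizing d with
  | nil => simp
  | cons p rest ih =>
      simp only [List.foldl_cons, List.filter_cons]
      rw [ih]
      by_cases h : p.1 = k
      · simp [bStep, h, add_assoc]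

      · have hb : (p.1 == k) = false := by simp [h]
        have h' : k ≠ p.1 := fun e => h e.symm
        simp [bStep, PySem.Dict.getD_insert, h', hb]

-- key order of the event-stream fold: first occurrences of the event keys
theorem keys_foldl_bStep (l : List (String × Int)) :
    (l.foldl bStep (PySem.Dict.empty : PySem.Dict String Int)).keys
      = PySem.Set.ofList (l.map Prod.fst) := by
  unfold bStep
  rw [PySem.Dict.keys_foldl_insert_key]
  rw [PySem.Dict.keys_empty, PySem.Set.update_nil_left]

theorem nodup_keys_foldl_bStep (l : List (String × Int)) :
    (l.foldl bStep (PySem.Dict.empty : PySem.Dict String Int)).keys.Nodup := by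
  unfold bStep
  exact PySem.Dict.nodup_keys_foldl_insert_key l Prod.fst _ _ PySem.Dict.nodup_keys_empty

-- the event keys, in order, are exactly key :: neighbors per item
theorem deltas_map_fst (edges : List (String × List String)) :
    (pvDeltas edges).map Prod.fst = edges.flatMap (fun kv => kv.1 :: kv.2) := by
  unfold pvDeltas
  rw [List.map_flatMap]
  simp [List.map_map, Function.comp_def]

-- the per-node sum of signed deltas equals B's closed formula (distinct keys)
theorem sum_deltas_eq (edges : List (String × List String)) (n : String)
    (h : (edges.map Prod.fst).Nodup) :
    (((pvDeltas edges).filter (fun p => p.1 == n)).map Prod.snd).sum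
      = (match edges.find? (fun kv => kv.1 == n) with
         | some kv => (kv.2.length : Int)
         | none => 0) - ((edges.flatMap (fun kv => kv.2)).count n : Int) := by
  induction edges with
  | nil => simp [pvDeltas]
  | cons kv rest ih =>
      simp only [List.map_cons, List.nodup_cons] at h
      obtain ⟨hk, hrest⟩ := h
      have ihv := ih hrest
      have hmapsum :
          (((kv.2.map (fun v => (v, (-1 : Int)))).filter (fun p => p.1 == n)).map Prod.snd).sum
            = -(kv.2.count n : Int) := by
        rw [List.filter_map, List.map_map]
        show ((kv.2.filter (fun v => v == n)).map (fun _ => (-1 : Int))).sum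
            = -(kv.2.count n : Int)
        rw [List.map_const', List.sum_replicate, nsmul_eq_mul]
        have hcnt : (kv.2.filter (fun v => v == n)).length = kv.2.count n := by
          simp [List.count_eq_countP, List.countP_eq_length_filter]
        rw [hcnt]; ring
      simp only [pvDeltas, List.flatMap_cons, List.filter_append, List.filter_cons,
        List.map_append, List.sum_append, List.find?_cons, List.count_append] at *
      by_cases hkn : kv.1 = n
      · have hb : (kv.1 == n) = true := by simp [hkn]
        have hnone : rest.find? (fun kv => kv.1 == n) = none := by
          rw [List.find?_eq_none]
          intro x hx hxb
          apply hk
          have hx1 : x.1 = n := by simpa using hxb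
          rw [hkn, ← hx1]
          exact List.mem_map_of_mem hx
        rw [hnone] at ihv
        simp only [hnone]
        simp [hb, hmapsum, ihv]
        ring
      · have hb : (kv.1 == n) = false := by simp [hkn]
        simp only [hb]
        cases hf : rest.find? (fun kv => kv.1 == n) <;>
          simp only [hf] at ihv ⊢ <;> simp [hmapsum, ihv] <;> ring

-- the counter in B reads back the occurrence count
theorem cnt_getD (flat : List String) (n : String) :
    (flat.foldl (fun d v => d.insert v (d.getD v 0 + 1))
        (PySem.Dict.empty : PySem.Dict String Int)).getD n 0
      = (flat.count n : Int) := by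
  rw [PySem.Dict.getD_foldl_insert_add_one]
  simp

-- ===== VERDICT (by name: the statement is the Claim_ definition above) =====
theorem degrees_spec : Claim_equal_degrees := by
  intro edges _ hpre
  unfold Spec_degrees degrees degrees_alt
  rw [dictsA_eq]
  rw [PySem.Dict.items_eq_map_keys _ (nodup_keys_foldl_bStep _) 0]
  rw [keys_foldl_bStep, deltas_map_fst]
  rw [PySem.List.dedup_eq_ofList]
  apply List.map_congr_left
  intro n _
  have := getD_foldl_bStep (pvDeltas edges) PySem.Dict.empty n
  rw [this]
  rw [cnt_getD]
  rw [sum_deltas_eq edges n hpre]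
  simp
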